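-- pv_equiv track=rewrite | github.com/amtulifra/vexor | src/vexor/indexes/kdtree.py | _union_metadata
-- ===== SOURCE A (Python) =====
-- from typing import Any
--
-- def _union_metadata(metas: list[dict[str, Any]]) -> dict[str, set]:
--     union: dict[str, set] = {}
--     for m in metas:
--         for k, v in m.items():
--             if k not in union:
--                 union[k] = set()
--             union[k].add(v)
--     return union
-- ===== SOURCE B (Python) =====
-- def _union_metadata(metas):
--     keys = dict.fromkeys(k for m in metas for k in m)
--     return {k: {m[k] for m in metas if k in m} for k in keys}
-- ===== Notes on version B (the rewrite author's own statement) =====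
-- stated objective: alternative
-- what changed: Inverts the traversal: instead of streaming all pairs into a mutable dict of growing sets, B first collects the deduplicated key list (dict.fromkeys) and then builds each key's value set by a comprehension rescanning metas, with no mutation or membership-guarded set creation.
import Mathlib
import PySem

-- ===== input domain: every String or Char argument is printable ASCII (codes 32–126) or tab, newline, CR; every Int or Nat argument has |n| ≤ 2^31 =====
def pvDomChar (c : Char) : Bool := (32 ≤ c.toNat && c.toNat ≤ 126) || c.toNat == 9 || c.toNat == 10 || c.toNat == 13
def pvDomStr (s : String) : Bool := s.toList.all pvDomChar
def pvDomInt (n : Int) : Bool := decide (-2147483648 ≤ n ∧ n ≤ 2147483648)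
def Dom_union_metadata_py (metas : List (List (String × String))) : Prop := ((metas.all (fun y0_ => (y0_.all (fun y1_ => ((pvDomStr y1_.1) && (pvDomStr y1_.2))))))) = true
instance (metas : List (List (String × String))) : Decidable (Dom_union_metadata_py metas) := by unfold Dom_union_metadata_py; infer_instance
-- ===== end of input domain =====

-- B replaces A's streaming accumulation into a mutable dict of sets by a key-outer grouping
-- (deduplicated key list first, then one value-set comprehension per key); same cost class, no speed claim.

-- ===== PORT A =====
-- the body of A's inner loop: 'if k not in union: union[k] = set()' then 'union[k].add(v)'
def pvStepA (union : PySem.Dict String (PySem.Set String)) (kv : String × String) :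
    PySem.Dict String (PySem.Set String) :=
  let union := if union.contains kv.1 then union else union.insert kv.1 PySem.Set.empty
  union.modify kv.1 PySem.Set.empty (fun s => PySem.Set.add s kv.2)

def union_metadata_py (metas : List (List (String × String))) : List (String × List String) :=
  (metas.foldl (fun union m => m.foldl pvStepA union) PySem.Dict.empty).items

-- ===== PORT B =====
def union_metadata_py_alt (metas : List (List (String × String))) : List (String × List String) :=
  let keys := PySem.List.dedup (metas.flatMap (fun m => m.map Prod.fst))
  keys.map (fun k =>
    (k, PySem.Set.ofList (metas.filterMap (fun m => (PySem.Dict.mk m).get? k))))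

-- ===== PRECONDITION & SPEC =====
-- Pre_ excludes metas whose association-list encoding repeats a key inside one dict: a Python
-- dict cannot hold duplicate keys, so such lists do not encode a real input of A, and which of
-- the duplicate values to keep is an accident of the encoding.
def Pre_union_metadata_py (metas : List (List (String × String))) : Prop :=
  ∀ m ∈ metas, (m.map Prod.fst).Nodup
instance (metas : List (List (String × String))) : Decidable (Pre_union_metadata_py metas) := by
  unfold Pre_union_metadata_py; infer_instance
def pvWitness_union_metadata_py : (List (List (String × String))) :=
  [[("a", "1")], [("a", "2"), ("b", "3")]]

def Spec_union_metadata_py (metas : List (List (String × String))) (out : List (String × List String)) : Prop := out = union_metadata_py_alt metas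
instance (metas : List (List (String × String))) (out : List (String × List String)) : Decidable (Spec_union_metadata_py metas out) := by unfold Spec_union_metadata_py; infer_instance

-- ===== CLAIM (what is proved, stated in full; the proofs are below) =====
def Claim_equal_union_metadata_py : Prop := ∀ (metas : List (List (String × String))), Dom_union_metadata_py metas → Pre_union_metadata_py metas → Spec_union_metadata_py metas (union_metadata_py metas)

-- ===== LEMMAS AND PROOFS =====

-- the value sets and key list both programs describe, over the flattened pair list
def pvVals (ps : List (String × String)) (k : String) : PySem.Set String :=
  PySem.Set.ofList ((ps.filter (fun p => p.1 == k)).map Prod.snd)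

-- one A-step changes only the entry at the pair's key, adding its value
theorem pvStepA_getD (d : PySem.Dict String (PySem.Set String)) (p : String × String)
    (k : String) :
    (pvStepA d p).getD k PySem.Set.empty =
      if k = p.1 then PySem.Set.add (d.getD p.1 PySem.Set.empty) p.2
      else d.getD k PySem.Set.empty := by
  unfold pvStepA
  by_cases h : d.contains p.1
  · rw [if_pos h, PySem.Dict.getD_modify]
  · have h' : d.contains p.1 = false := by simpa using h
    rw [if_neg h]
    simp only [PySem.Dict.getD_modify, PySem.Dict.getD_insert,
      PySem.Dict.getD_of_not_contains d _ h']
    split_ifs <;> simp_all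

theorem pvStepA_keys (d : PySem.Dict String (PySem.Set String)) (p : String × String) :
    (pvStepA d p).keys = PySem.Set.add d.keys p.1 := by
  unfold pvStepA
  by_cases h : d.contains p.1
  · have hmem : p.1 ∈ d.keys := (PySem.Dict.contains_iff_mem_keys d p.1).mp h
    rw [if_pos h, PySem.Dict.keys_modify, PySem.Dict.keys_insert_of_contains _ _ h]
    simp [PySem.Set.add, PySem.Set.contains, hmem]
  · have h' : d.contains p.1 = false := by simpa using h
    have hmem : p.1 ∉ d.keys := fun hm => h ((PySem.Dict.contains_iff_mem_keys d p.1).mpr hm)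
    rw [if_neg h, PySem.Dict.keys_modify,
      PySem.Dict.keys_insert_of_contains _ _ (PySem.Dict.contains_insert_self d p.1 _),
      PySem.Dict.keys_insert_of_not_contains d _ h']
    simp [PySem.Set.add, PySem.Set.contains, hmem]

-- invariant of A's (flattened) loop: the entry at each key collects that key's values
theorem pvFoldA_getD (ps : List (String × String)) (d : PySem.Dict String (PySem.Set String))
    (k : String) :
    (ps.foldl pvStepA d).getD k PySem.Set.empty =
      PySem.Set.update (d.getD k PySem.Set.empty) ((ps.filter (fun p => p.1 == k)).map Prod.snd) := by
  induction ps generalizing d with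
  | nil => simp [PySem.Set.update_nil]
  | cons p ps ih =>
    rw [List.foldl_cons, ih, pvStepA_getD, List.filter_cons]
    by_cases h : p.1 = k
    · rw [if_pos h.symm, if_pos (by simp [h]), List.map_cons, PySem.Set.update_cons, h]
    · rw [if_neg (Ne.symm h), if_neg (by simp [h])]

theorem pvFoldA_keys (ps : List (String × String)) (d : PySem.Dict String (PySem.Set String)) :
    (ps.foldl pvStepA d).keys = PySem.Set.update d.keys (ps.map Prod.fst) := by
  induction ps generalizing d with
  | nil => simp [PySem.Set.update_nil]
  | cons p ps ih => rw [List.foldl_cons, ih, pvStepA_keys, List.map_cons, PySem.Set.update_cons]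

-- A, in terms of the flattened pair list
theorem pvA_eq (metas : List (List (String × String))) :
    union_metadata_py metas =
      (PySem.Set.ofList (metas.flatten.map Prod.fst)).map
        (fun k => (k, pvVals metas.flatten k)) := by
  unfold union_metadata_py
  have hfold : metas.foldl (fun union m => m.foldl pvStepA union) PySem.Dict.empty
      = metas.flatten.foldl pvStepA PySem.Dict.empty := by
    rw [← List.flatMap_id (L := metas), List.foldl_flatMap]
    rfl
  rw [hfold]
  have hkeys : (metas.flatten.foldl pvStepA PySem.Dict.empty).keys
      = PySem.Set.ofList (metas.flatten.map Prod.fst) := by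
    rw [pvFoldA_keys, PySem.Dict.keys_empty, PySem.Set.update_nil_left]
  have hnd : (metas.flatten.foldl pvStepA PySem.Dict.empty).keys.Nodup := by
    rw [hkeys]; exact PySem.Set.nodup_ofList _
  rw [PySem.Dict.items_eq_map_keys _ hnd PySem.Set.empty, hkeys]
  refine List.map_congr_left (fun k _ => ?_)
  rw [pvFoldA_getD, PySem.Dict.getD_empty, PySem.Set.update_empty, pvVals]

-- on a dict without duplicate keys, filtering for a key yields exactly the get? result
theorem pvFilter_eq_get? (m : List (String × String)) (hm : (m.map Prod.fst).Nodup)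
    (k : String) :
    (m.filter (fun p => p.1 == k)).map Prod.snd = ((PySem.Dict.mk m).get? k).toList := by
  induction m with
  | nil => rfl
  | cons p m ih =>
    simp only [List.map_cons, List.nodup_cons] at hm
    obtain ⟨p1, p2⟩ := p
    rw [PySem.Dict.get?_mk_cons]
    by_cases h : p1 = k
    · subst h
      have hnil : m.filter (fun p => p.1 == p1) = [] := by
        rw [List.filter_eq_nil_iff]
        intro q hq hq'
        have hq1 : q.1 = p1 := by simpa using hq'
        exact hm.1 (List.mem_map.mpr ⟨q, hq, hq1⟩)
      simp [hnil]
    · have hne : (p1 == k) = false := by simp [h]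
      simp [hne, ih hm.2]

-- B's per-key rescan equals the flattened filter
theorem pvB_vals (metas : List (List (String × String)))
    (hpre : ∀ m ∈ metas, (m.map Prod.fst).Nodup) (k : String) :
    metas.filterMap (fun m => (PySem.Dict.mk m).get? k) =
      (metas.flatten.filter (fun p => p.1 == k)).map Prod.snd := by
  induction metas with
  | nil => simp
  | cons m metas ih =>
    have hm := hpre m (by simp)
    have ih' := ih (fun m' hm' => hpre m' (by simp [hm']))
    rw [List.filterMap_cons, List.flatten_cons, List.filter_append, List.map_append,
      pvFilter_eq_get? m hm k, ← ih']
    cases (PySem.Dict.mk m).get? k <;> simp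

theorem pvB_eq (metas : List (List (String × String)))
    (hpre : ∀ m ∈ metas, (m.map Prod.fst).Nodup) :
    union_metadata_py_alt metas =
      (PySem.Set.ofList (metas.flatten.map Prod.fst)).map
        (fun k => (k, pvVals metas.flatten k)) := by
  unfold union_metadata_py_alt
  have hkeys : metas.flatMap (fun m => m.map Prod.fst) = metas.flatten.map Prod.fst := by
    simp [List.flatMap_def, List.map_flatten]
  rw [PySem.List.dedup_eq_ofList, hkeys]
  exact List.map_congr_left (fun k _ => by rw [pvB_vals metas hpre k, pvVals])

-- ===== VERDICT (by name: the statement is the Claim_ definition above) =====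
theorem union_metadata_py_spec : Claim_equal_union_metadata_py := by
  intro metas _ hpre
  unfold Spec_union_metadata_py
  rw [pvA_eq, pvB_eq metas hpre]
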